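-- pv_equiv track=rewrite | github.com/gustavdup/getcute-app | src/services/media_monitor.py | _analyze_files
-- ===== SOURCE A (Python) =====
-- from typing import Dict, Any, List, Optional
--
-- def _analyze_files(files: List[Dict[str, Any]]) -> Dict[str, int]:
--     """Analyze file statistics."""
--     stats = {
--         'total_files': len(files),
--         'audio_count': 0,
--         'image_count': 0,
--         'document_count': 0,
--         'successful_uploads': 0,
--         'failed_uploads': 0,
--         'transcribed_count': 0,
--         'failed_transcriptions': 0
--     }
--
--     for file_data in files:
--         file_type = file_data.get('file_type', 'unknown')
--         upload_status = file_data.get('upload_status', 'unknown')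
--         transcription_status = file_data.get('transcription_status', 'none')
--
--         # Count by type
--         if file_type == 'audio':
--             stats['audio_count'] += 1
--             if transcription_status == 'completed':
--                 stats['transcribed_count'] += 1
--             elif transcription_status == 'failed':
--                 stats['failed_transcriptions'] += 1
--         elif file_type == 'image':
--             stats['image_count'] += 1
--         elif file_type == 'document':
--             stats['document_count'] += 1
--
--         # Count by status
--         if upload_status == 'completed':
--             stats['successful_uploads'] += 1
--         elif upload_status == 'failed':
--             stats['failed_uploads'] += 1
--
--     return stats
-- ===== SOURCE B (Python) =====
-- from typing import Dict, Any, List, Optional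
--
-- def _analyze_files(files: List[Dict[str, Any]]) -> Dict[str, int]:
--     """Analyze file statistics (tabulate-then-count decomposition)."""
--     types = [f.get('file_type', 'unknown') for f in files]
--     statuses = [f.get('upload_status', 'unknown') for f in files]
--     trans = [f.get('transcription_status', 'none')
--              for f in files if f.get('file_type', 'unknown') == 'audio']
--     return {
--         'total_files': len(files),
--         'audio_count': types.count('audio'),
--         'image_count': types.count('image'),
--         'document_count': types.count('document'),
--         'successful_uploads': statuses.count('completed'),
--         'failed_uploads': statuses.count('failed'),
--         'transcribed_count': trans.count('completed'),
--         'failed_transcriptions': trans.count('failed'),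
--     }
-- ===== Notes on version B (the rewrite author's own statement) =====
-- stated objective: idiomatic
-- what changed: Replaces the single branching accumulation loop over a mutable stats dict by extracting the type/status/audio-transcription key columns with comprehensions and assembling the result from list.count lookups.
import Mathlib
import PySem

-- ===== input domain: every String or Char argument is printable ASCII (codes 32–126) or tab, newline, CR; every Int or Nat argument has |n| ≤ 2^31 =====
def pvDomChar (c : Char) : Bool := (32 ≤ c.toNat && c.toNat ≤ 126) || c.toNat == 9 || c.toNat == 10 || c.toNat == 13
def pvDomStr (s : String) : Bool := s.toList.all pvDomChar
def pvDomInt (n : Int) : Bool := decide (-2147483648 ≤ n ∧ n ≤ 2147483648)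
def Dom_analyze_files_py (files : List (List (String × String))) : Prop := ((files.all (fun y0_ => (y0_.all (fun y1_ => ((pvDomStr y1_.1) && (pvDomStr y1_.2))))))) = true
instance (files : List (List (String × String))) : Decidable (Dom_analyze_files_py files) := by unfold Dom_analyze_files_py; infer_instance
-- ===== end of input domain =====

set_option maxHeartbeats 1000000


-- B replaces A's single branching accumulation loop over a mutable stats dict
-- by column extraction (comprehensions) plus list.count lookups; objective: idiomatic.

-- ===== PORT A =====
-- file_data.get(k, dflt): first-match lookup on the association list (exact for the
-- dict-as-assoc-list convention; a Python dict has unique keys)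
def pyGet (f : List (String × String)) (k dflt : String) : String :=
  match f.find? (fun p => p.1 == k) with
  | some p => p.2
  | none => dflt

-- stats[k] += 1 on the fixed-key stats dict: exact hand port (k is always present)
def bump (stats : List (String × Int)) (k : String) : List (String × Int) :=
  stats.map (fun p => if p.1 == k then (p.1, p.2 + 1) else p)

-- one iteration of A's for-loop body over the stats dict
def analyzeStep (stats : List (String × Int)) (file_data : List (String × String)) : List (String × Int) :=
  let file_type := pyGet file_data "file_type" "unknown"
  let upload_status := pyGet file_data "upload_status" "unknown"
  let transcription_status := pyGet file_data "transcription_status" "none"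
  let stats :=
    if file_type == "audio" then
      let stats := bump stats "audio_count"
      if transcription_status == "completed" then
        bump stats "transcribed_count"
      else if transcription_status == "failed" then
        bump stats "failed_transcriptions"
      else stats
    else if file_type == "image" then
      bump stats "image_count"
    else if file_type == "document" then
      bump stats "document_count"
    else stats
  if upload_status == "completed" then
    bump stats "successful_uploads"
  else if upload_status == "failed" then
    bump stats "failed_uploads"
  else stats

def analyze_files_py (files : List (List (String × String))) : List (String × Int) :=
  let stats : List (String × Int) :=
    [("total_files", (files.length : Int)), ("audio_count", 0), ("image_count", 0),
     ("document_count", 0), ("successful_uploads", 0), ("failed_uploads", 0),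
     ("transcribed_count", 0), ("failed_transcriptions", 0)]
  files.foldl analyzeStep stats

-- ===== PORT B =====
def analyze_files_py_alt (files : List (List (String × String))) : List (String × Int) :=
  let types := files.map (fun f => pyGet f "file_type" "unknown")
  let statuses := files.map (fun f => pyGet f "upload_status" "unknown")
  let trans := (files.filter (fun f => pyGet f "file_type" "unknown" == "audio")).map
      (fun f => pyGet f "transcription_status" "none")
  [("total_files", (files.length : Int)),
   ("audio_count", (types.count "audio" : Int)),
   ("image_count", (types.count "image" : Int)),
   ("document_count", (types.count "document" : Int)),
   ("successful_uploads", (statuses.count "completed" : Int)),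
   ("failed_uploads", (statuses.count "failed" : Int)),
   ("transcribed_count", (trans.count "completed" : Int)),
   ("failed_transcriptions", (trans.count "failed" : Int))]

-- ===== PRECONDITION & SPEC =====
def Spec_analyze_files_py (files : List (List (String × String))) (out : List (String × Int)) : Prop := out = analyze_files_py_alt files
instance (files : List (List (String × String))) (out : List (String × Int)) : Decidable (Spec_analyze_files_py files out) := by unfold Spec_analyze_files_py; infer_instance

-- ===== CLAIM (what is proved, stated in full; the proofs are below) =====
def Claim_equal_analyze_files_py : Prop := ∀ (files : List (List (String × String))), Dom_analyze_files_py files → Spec_analyze_files_py files (analyze_files_py files)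

-- ===== LEMMAS AND PROOFS =====
-- loop invariant: folding A's step over l from an arbitrary 8-entry stats dict
-- adds exactly the counts B computes
theorem analyze_fold (l : List (List (String × String)))
    (t a i d su fu tc ft : Int) :
    List.foldl analyzeStep
      [("total_files", t), ("audio_count", a), ("image_count", i),
       ("document_count", d), ("successful_uploads", su), ("failed_uploads", fu),
       ("transcribed_count", tc), ("failed_transcriptions", ft)] l
    = [("total_files", t),
       ("audio_count", a + ((l.map (fun f => pyGet f "file_type" "unknown")).count "audio" : Int)),
       ("image_count", i + ((l.map (fun f => pyGet f "file_type" "unknown")).count "image" : Int)),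
       ("document_count", d + ((l.map (fun f => pyGet f "file_type" "unknown")).count "document" : Int)),
       ("successful_uploads", su + ((l.map (fun f => pyGet f "upload_status" "unknown")).count "completed" : Int)),
       ("failed_uploads", fu + ((l.map (fun f => pyGet f "upload_status" "unknown")).count "failed" : Int)),
       ("transcribed_count", tc + (((l.filter (fun f => pyGet f "file_type" "unknown" == "audio")).map
         (fun f => pyGet f "transcription_status" "none")).count "completed" : Int)),
       ("failed_transcriptions", ft + (((l.filter (fun f => pyGet f "file_type" "unknown" == "audio")).map
         (fun f => pyGet f "transcription_status" "none")).count "failed" : Int))] := by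
  induction l generalizing t a i d su fu tc ft with
  | nil => simp
  | cons x xs ih =>
    simp only [List.foldl_cons]
    have hx : ∀ t a i d su fu tc ft : Int,
        analyzeStep
          [("total_files", t), ("audio_count", a), ("image_count", i),
           ("document_count", d), ("successful_uploads", su), ("failed_uploads", fu),
           ("transcribed_count", tc), ("failed_transcriptions", ft)] x
        = [("total_files", t),
           ("audio_count", a + if pyGet x "file_type" "unknown" == "audio" then 1 else 0),
           ("image_count", i + if pyGet x "file_type" "unknown" == "image" then 1 else 0),
           ("document_count", d + if pyGet x "file_type" "unknown" == "document" then 1 else 0),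
           ("successful_uploads", su + if pyGet x "upload_status" "unknown" == "completed" then 1 else 0),
           ("failed_uploads", fu + if pyGet x "upload_status" "unknown" == "failed" then 1 else 0),
           ("transcribed_count", tc + if pyGet x "file_type" "unknown" == "audio" ∧ pyGet x "transcription_status" "none" == "completed" then 1 else 0),
           ("failed_transcriptions", ft + if pyGet x "file_type" "unknown" == "audio" ∧ pyGet x "transcription_status" "none" == "failed" then 1 else 0)] := by
      intro t a i d su fu tc ft
      by_cases h1 : pyGet x "file_type" "unknown" = "audio" <;>
      by_cases h2 : pyGet x "file_type" "unknown" = "image" <;>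
      by_cases h3 : pyGet x "file_type" "unknown" = "document" <;>
      by_cases h4 : pyGet x "transcription_status" "none" = "completed" <;>
      by_cases h5 : pyGet x "transcription_status" "none" = "failed" <;>
      by_cases h6 : pyGet x "upload_status" "unknown" = "completed" <;>
      by_cases h7 : pyGet x "upload_status" "unknown" = "failed" <;>
        simp_all [analyzeStep, bump]
    rw [hx, ih]
    simp only [List.map_cons, List.count_cons, List.filter_cons]
    split_ifs <;> simp_all <;> omega

-- ===== VERDICT (by name: the statement is the Claim_ definition above) =====
theorem analyze_files_py_spec : Claim_equal_analyze_files_py := by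
  intro files _
  show analyze_files_py files = analyze_files_py_alt files
  simp only [analyze_files_py, analyze_files_py_alt]
  rw [analyze_fold]
  simp
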